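-- pv_equiv track=rewrite | github.com/v1Lt/CS5800-Maze-Runner | code/dfs.py | _dfs_trace_to_nearest
-- ===== SOURCE A (Python) =====
-- from typing import Any, Dict, List, Optional, Set, Tuple
--
-- UP    = 1
--
-- RIGHT = 2
--
-- DOWN  = 4
--
-- LEFT  = 8
--
-- Coord = Tuple[int, int]
--
-- def _open_neighbors(cells: List[List[int]], pos: Coord) -> List[Coord]:
--     """Return all grid neighbors reachable from pos (no wall between them)."""
--     rows, cols = len(cells), len(cells[0])
--     r, c = pos
--     result: List[Coord] = []
--     if r > 0        and not (cells[r][c] & UP):    result.append((r - 1, c))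
--     if c < cols - 1 and not (cells[r][c] & RIGHT): result.append((r, c + 1))
--     if r < rows - 1 and not (cells[r][c] & DOWN):  result.append((r + 1, c))
--     if c > 0        and not (cells[r][c] & LEFT):  result.append((r, c - 1))
--     return result
--
-- def _dfs_trace_to_nearest(
--     cells: List[List[int]],
--     src: Coord,
--     targets: Set[Coord],
-- ) -> Optional[List[Coord]]:
--     """
--     Iterative DFS from src.  Stop as soon as ANY cell in *targets* is
--     first reached.
--
--     Returns the FULL traversal trace — every forward step and every
--     backtrack move is recorded — so the path length reflects true DFS
--     behaviour, not just the solution length.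
--
--     Returns None if no target is reachable.
--     """
--     if src in targets:
--         return [src]
--
--     nb_cache: Dict[Coord, List[Coord]] = {}
--
--     def neighbors(pos: Coord) -> List[Coord]:
--         if pos not in nb_cache:
--             nb_cache[pos] = _open_neighbors(cells, pos)
--         return nb_cache[pos]
--
--     stack: List[Tuple[Coord, int]] = [(src, 0)]
--     visited: Set[Coord] = {src}
--     trace: List[Coord] = [src]
--
--     while stack:
--         cur, nb_idx = stack[-1]
--         nb_list = neighbors(cur)
--         found_next = False
--
--         while nb_idx < len(nb_list):
--             nb = nb_list[nb_idx]
--             nb_idx += 1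
--             if nb not in visited:
--                 # update iterator index for current frame
--                 stack[-1] = (cur, nb_idx)
--                 visited.add(nb)
--                 stack.append((nb, 0))
--                 trace.append(nb)
--
--                 if nb in targets:
--                     return trace
--
--                 found_next = True
--                 break
--
--         if not found_next:
--             stack.pop()
--             if stack:
--                 parent_pos = stack[-1][0]
--                 trace.append(parent_pos)
--
--     return None
-- ===== SOURCE B (Python) =====
-- from typing import Dict, List, Optional, Set, Tuple
--
-- UP    = 1
-- RIGHT = 2
-- DOWN  = 4
-- LEFT  = 8
--
-- Coord = Tuple[int, int]
--
--
-- def _open_neighbors(cells: List[List[int]], pos: Coord) -> List[Coord]: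
--     """Return all grid neighbors reachable from pos (no wall between them)."""
--     rows, cols = len(cells), len(cells[0])
--     r, c = pos
--     result: List[Coord] = []
--     if r > 0        and not (cells[r][c] & UP):    result.append((r - 1, c))
--     if c < cols - 1 and not (cells[r][c] & RIGHT): result.append((r, c + 1))
--     if r < rows - 1 and not (cells[r][c] & DOWN):  result.append((r + 1, c))
--     if c > 0        and not (cells[r][c] & LEFT):  result.append((r, c - 1))
--     return result
--
--
-- def _dfs_trace_to_nearest(
--     cells: List[List[int]],
--     src: Coord,
--     targets: Set[Coord],
-- ) -> Optional[List[Coord]]: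
--     """Recursive DFS sharing visited/trace state: dfs(cur) walks cur's open
--     neighbors in order, recursing into each unvisited one; when a child
--     subtree is exhausted it records the backtrack move to cur and goes on.
--     Returns the trace when dfs first reaches a target, else None — no
--     explicit frame stack and no saved iterator indices."""
--     if src in targets:
--         return [src]
--
--     visited = {src}
--     trace = [src]
--
--     def dfs(cur: Coord) -> bool:
--         for nb in _open_neighbors(cells, cur):
--             if nb not in visited:
--                 visited.add(nb)
--                 trace.append(nb)
--                 if nb in targets:
--                     return True
--                 if dfs(nb):
--                     return True
--                 trace.append(cur)
--         return False
--
--     return trace if dfs(src) else None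
-- ===== Notes on version B (the rewrite author's own statement) =====
-- stated objective: simpler
-- what changed: A's explicit-stack DFS with per-frame saved iterator indices and a neighbor-list cache is replaced by a plain recursive dfs(cur) that walks the open neighbors of cur in order, sharing the visited set and trace across calls and recording a backtrack move to cur after each exhausted child subtree.
-- outside the precondition, e.g. on _dfs_trace_to_nearest([[15, 15], [15]], (0, 0), {(1, 1)}): A returns None, B returns None
import Mathlib
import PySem

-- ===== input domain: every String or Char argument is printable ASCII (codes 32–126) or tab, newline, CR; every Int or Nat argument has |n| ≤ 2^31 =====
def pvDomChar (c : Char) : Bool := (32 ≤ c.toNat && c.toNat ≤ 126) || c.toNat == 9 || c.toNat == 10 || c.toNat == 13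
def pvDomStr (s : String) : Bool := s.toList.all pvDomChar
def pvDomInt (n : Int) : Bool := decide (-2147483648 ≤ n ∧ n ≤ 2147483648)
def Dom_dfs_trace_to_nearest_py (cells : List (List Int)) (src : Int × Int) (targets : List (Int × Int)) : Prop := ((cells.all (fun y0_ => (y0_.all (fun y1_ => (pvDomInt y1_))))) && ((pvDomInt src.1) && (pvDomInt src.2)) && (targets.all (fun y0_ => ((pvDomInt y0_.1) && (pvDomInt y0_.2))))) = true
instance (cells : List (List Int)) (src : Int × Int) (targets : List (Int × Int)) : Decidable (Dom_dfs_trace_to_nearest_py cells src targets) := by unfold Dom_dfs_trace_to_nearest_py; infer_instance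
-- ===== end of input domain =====

-- B replaces A's explicit stack of (cell, saved-iterator-index) frames (plus a neighbor cache)
-- by a plain recursive dfs sharing the visited set and trace: same trace, simpler decomposition.

-- ===== PORT A =====
-- _open_neighbors, shared by both Pythons. Outside Pre_ (where Python raises IndexError)
-- the pyGet? defaults ([] / 0) are never reached by the claim; inside Pre_ every index is in range.
def pvOpenNeighbors (cells : List (List Int)) (pos : Int × Int) : List (Int × Int) :=
  let rows : Int := cells.length
  let cols : Int := ((PySem.List.pyGet? cells 0).getD []).length
  let r := pos.1
  let c := pos.2
  let v : Int := (PySem.List.pyGet? ((PySem.List.pyGet? cells r).getD []) c).getD 0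
  (if r > 0 ∧ PySem.Int.band v 1 = 0 then [(r - 1, c)] else []) ++
  (if c < cols - 1 ∧ PySem.Int.band v 2 = 0 then [(r, c + 1)] else []) ++
  (if r < rows - 1 ∧ PySem.Int.band v 4 = 0 then [(r + 1, c)] else []) ++
  (if c > 0 ∧ PySem.Int.band v 8 = 0 then [(r, c - 1)] else [])

-- fuel bound (termination guard only, shared by both ports): the loop/recursion performs at most
-- 2·|visited|+1 forward/backtrack events and, inside Pre_, |visited| ≤ 4·rows·cols; generous.
def pvFuel (cells : List (List Int)) : Nat :=
  8 * cells.length * ((PySem.List.pyGet? cells 0).getD []).length + 9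

-- A's cached neighbors(pos): look up nb_cache, computing and inserting on a miss.
def pvNeighborsCached (cells : List (List Int))
    (cache : PySem.Dict (Int × Int) (List (Int × Int))) (pos : Int × Int) :
    List (Int × Int) × PySem.Dict (Int × Int) (List (Int × Int)) :=
  match cache.get? pos with
  | some l => (l, cache)
  | none => let l := pvOpenNeighbors cells pos; (l, cache.insert pos l)

-- A's inner 'while nb_idx < len(nb_list)': first unvisited neighbor from index i, with the
-- incremented index the frame is updated to.
def pvScanA (nbs : List (Int × Int)) (visited : PySem.Set (Int × Int)) (i : Nat) :
    Option ((Int × Int) × Nat) :=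
  if h : i < nbs.length then
    if visited.contains nbs[i] then pvScanA nbs visited (i + 1)
    else some (nbs[i], i + 1)
  else none
termination_by nbs.length - i

-- A's outer 'while stack' (stack top at the HEAD of the list).
def pvLoopA (cells : List (List Int)) (targets : List (Int × Int)) :
    Nat → List ((Int × Int) × Nat) → PySem.Set (Int × Int) → List (Int × Int) →
    PySem.Dict (Int × Int) (List (Int × Int)) → Option (List (Int × Int))
  | 0, _, _, _, _ => none
  | _ + 1, [], _, _, _ => none
  | fuel + 1, (cur, i) :: rest, visited, trace, cache =>
    let nc := pvNeighborsCached cells cache cur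
    match pvScanA nc.1 visited i with
    | some (nb, i') =>
      let visited' := visited.add nb
      let trace' := trace ++ [nb]
      if targets.contains nb then some trace'
      else pvLoopA cells targets fuel ((nb, 0) :: (cur, i') :: rest) visited' trace' nc.2
    | none =>
      match rest with
      | [] => none
      | (p, j) :: rest' =>
        pvLoopA cells targets fuel ((p, j) :: rest') visited (trace ++ [p]) nc.2

def dfs_trace_to_nearest_py (cells : List (List Int)) (src : Int × Int) (targets : List (Int × Int)) : Option (List (Int × Int)) :=
  if targets.contains src then some [src]
  else pvLoopA cells targets (pvFuel cells) [(src, 0)]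
    (PySem.Set.ofList [src]) [src] (PySem.Dict.mk [])

-- ===== PORT B =====
-- outcome of Source B's recursive dfs(cur): True with the trace so far; False with the shared
-- visited/trace state and the remaining fuel; or fuel exhaustion (a guard, never reached
-- when the fuel hypotheses of the simulation lemma hold).
inductive PvOutB where
  | found : List (Int × Int) → PvOutB
  | fls : PySem.Set (Int × Int) → List (Int × Int) → Nat → PvOutB
  | timeout : PvOutB

-- Source B's 'for nb in _open_neighbors(cells, cur)' body, recursing into dfs(nb) = pvGoB on
-- nb's full neighbor list. F is a structural recursion-depth guard; g counts the
-- forward/backtrack events and is threaded through returns (both are termination guards only).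
def pvGoB (cells : List (List Int)) (targets : List (Int × Int)) :
    Nat → (Int × Int) → List (Int × Int) → Nat → PySem.Set (Int × Int) → List (Int × Int) → PvOutB
  | 0, _, _, _, _, _ => .timeout
  | _ + 1, _, [], g, v, t => .fls v t g
  | F + 1, cur, nb :: rest, g, v, t =>
    if v.contains nb then pvGoB cells targets F cur rest g v t
    else match g with
      | 0 => .timeout
      | g' + 1 =>
        let v' := v.add nb
        let t' := t ++ [nb]
        if targets.contains nb then .found t'
        else match pvGoB cells targets F nb (pvOpenNeighbors cells nb) g' v' t' with
          | .found t'' => .found t''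
          | .timeout => .timeout
          | .fls v'' t'' h =>
            match h with
            | 0 => .timeout
            | h' + 1 => pvGoB cells targets F cur rest h' v'' (t'' ++ [cur])

def dfs_trace_to_nearest_py_alt (cells : List (List Int)) (src : Int × Int) (targets : List (Int × Int)) : Option (List (Int × Int)) :=
  if targets.contains src then some [src]
  else
    match pvGoB cells targets (5 * pvFuel cells + 6) src (pvOpenNeighbors cells src)
      (pvFuel cells) (PySem.Set.ofList [src]) [src] with
    | .found t => some t
    | _ => none

-- ===== PRECONDITION & SPEC =====
-- Pre_ excludes inputs where Python A raises IndexError: an empty or non-rectangular grid, or a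
-- source outside the wrapped index range (unless src ∈ targets, where A returns before indexing).
-- Non-rectangular grids on which the search happens not to reach a short row are also excluded:
-- whether such a grid raises depends on the search's reach, which has no closed form.
def Pre_dfs_trace_to_nearest_py (cells : List (List Int)) (src : Int × Int) (targets : List (Int × Int)) : Prop :=
  src ∈ targets ∨
  (cells ≠ [] ∧ 0 < cells.headI.length ∧
    (∀ row ∈ cells, row.length = cells.headI.length) ∧
    -(cells.length : Int) ≤ src.1 ∧ src.1 < cells.length ∧
    -(cells.headI.length : Int) ≤ src.2 ∧ src.2 < cells.headI.length)
instance (cells : List (List Int)) (src : Int × Int) (targets : List (Int × Int)) : Decidable (Pre_dfs_trace_to_nearest_py cells src targets) := by unfold Pre_dfs_trace_to_nearest_py; infer_instance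

def pvWitness_dfs_trace_to_nearest_py : List (List Int) × (Int × Int) × (List (Int × Int)) :=
  ([[0, 0], [0, 0]], (0, 0), [(1, 1)])

def Spec_dfs_trace_to_nearest_py (cells : List (List Int)) (src : Int × Int) (targets : List (Int × Int)) (out : Option (List (Int × Int))) : Prop := out = dfs_trace_to_nearest_py_alt cells src targets
instance (cells : List (List Int)) (src : Int × Int) (targets : List (Int × Int)) (out : Option (List (Int × Int))) : Decidable (Spec_dfs_trace_to_nearest_py cells src targets out) := by unfold Spec_dfs_trace_to_nearest_py; infer_instance

-- ===== CLAIM (what is proved, stated in full; the proofs are below) =====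
def Claim_equal_dfs_trace_to_nearest_py : Prop := ∀ (cells : List (List Int)) (src : Int × Int) (targets : List (Int × Int)), Dom_dfs_trace_to_nearest_py cells src targets → Pre_dfs_trace_to_nearest_py cells src targets → Spec_dfs_trace_to_nearest_py cells src targets (dfs_trace_to_nearest_py cells src targets)

-- ===== LEMMAS AND PROOFS =====

-- Both ports are proved equal to this intermediate path-stack machine (path top at the HEAD):
-- rescan the top cell's neighbor list for the first unvisited one; push it or pop and record.
def pvScanB (nbs : List (Int × Int)) (visited : PySem.Set (Int × Int)) : Option (Int × Int) :=
  match nbs with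
  | [] => none
  | nb :: rest => if visited.contains nb then pvScanB rest visited else some nb

def pvLoopB (cells : List (List Int)) (targets : List (Int × Int)) :
    Nat → List (Int × Int) → PySem.Set (Int × Int) → List (Int × Int) →
    Option (List (Int × Int))
  | 0, _, _, _ => none
  | _ + 1, [], _, _ => none
  | fuel + 1, cur :: restpath, visited, trace =>
    match pvScanB (pvOpenNeighbors cells cur) visited with
    | some nb =>
      let visited' := visited.add nb
      let trace' := trace ++ [nb]
      if targets.contains nb then some trace'
      else pvLoopB cells targets fuel (nb :: cur :: restpath) visited' trace'
    | none =>
      match restpath with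
      | [] => none
      | p :: rest' => pvLoopB cells targets fuel (p :: rest') visited (trace ++ [p])

-- the cache only ever stores correct neighbor lists
def pvCacheOK (cells : List (List Int)) (cache : PySem.Dict (Int × Int) (List (Int × Int))) : Prop :=
  ∀ p l, cache.get? p = some l → l = pvOpenNeighbors cells p

theorem pvNeighborsCached_fst (cells : List (List Int)) (cache : PySem.Dict (Int × Int) (List (Int × Int))) (pos : Int × Int)
    (h : pvCacheOK cells cache) : (pvNeighborsCached cells cache pos).1 = pvOpenNeighbors cells pos := by
  unfold pvNeighborsCached
  cases hg : cache.get? pos with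
  | none => rfl
  | some l => exact h pos l hg

theorem pvNeighborsCached_snd (cells : List (List Int)) (cache : PySem.Dict (Int × Int) (List (Int × Int))) (pos : Int × Int)
    (h : pvCacheOK cells cache) : pvCacheOK cells (pvNeighborsCached cells cache pos).2 := by
  unfold pvNeighborsCached
  cases hg : cache.get? pos with
  | none =>
    intro p l hl
    by_cases hp : p = pos
    · subst hp
      rw [PySem.Dict.get?_insert_self] at hl
      exact (Option.some_inj.mp hl).symm
    · rw [PySem.Dict.get?_insert] at hl
      simp only [if_neg hp] at hl
      exact h p l hl
  | some l => exact h

-- if pvScanA finds nothing from index i and everything before i is visited, every neighbor is visited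
theorem pvScanA_none (nbs : List (Int × Int)) (visited : PySem.Set (Int × Int)) :
    ∀ k i, nbs.length - i ≤ k → pvScanA nbs visited i = none →
      (∀ j (hj : j < nbs.length), j < i → visited.contains nbs[j] = true) →
      ∀ nb ∈ nbs, visited.contains nb = true := by
  intro k
  induction k with
  | zero =>
    intro i hk hnone hv nb hnb
    have hlen : nbs.length ≤ i := by omega
    obtain ⟨j, hj, rfl⟩ := List.mem_iff_getElem.mp hnb
    exact hv j hj (by omega)
  | succ k ih =>
    intro i hk hnone hv nb hnb
    unfold pvScanA at hnone
    by_cases h : i < nbs.length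
    · rw [dif_pos h] at hnone
      by_cases hc : visited.contains nbs[i] = true
      · rw [if_pos hc] at hnone
        refine ih (i + 1) (by omega) hnone ?_ nb hnb
        intro j hj hji
        by_cases hji' : j = i
        · subst hji'; exact hc
        · exact hv j hj (by omega)
      · rw [if_neg hc] at hnone
        exact absurd hnone (by simp)
    · obtain ⟨j, hj, rfl⟩ := List.mem_iff_getElem.mp hnb
      exact hv j hj (by omega)

-- pvScanB returns the first unvisited element
theorem pvScanB_first (visited : PySem.Set (Int × Int)) :
    ∀ (nbs : List (Int × Int)) i (hi : i < nbs.length),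
      (∀ j (hj : j < nbs.length), j < i → visited.contains nbs[j] = true) →
      visited.contains nbs[i] = false → pvScanB nbs visited = some nbs[i] := by
  intro nbs
  induction nbs with
  | nil => intro i hi; simp at hi
  | cons nb rest ih =>
    intro i hi hv hc
    cases i with
    | zero =>
      simp only [List.getElem_cons_zero] at hc
      simp only [pvScanB, List.getElem_cons_zero]
      rw [if_neg (by simpa using hc)]
    | succ i =>
      have h0 : visited.contains nb = true := by
        have := hv 0 (by simp) (by omega)
        simpa using this
      simp only [pvScanB, h0, if_pos]
      have := ih i (by simpa using hi)
        (fun j hj hji => by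
          have := hv (j + 1) (by simpa using Nat.succ_lt_succ hj) (by omega)
          simpa using this)
        (by simpa using hc)
      simpa using this

-- pvScanB returns none when every element is visited
theorem pvScanB_none (nbs : List (Int × Int)) (visited : PySem.Set (Int × Int))
    (h : ∀ nb ∈ nbs, visited.contains nb = true) : pvScanB nbs visited = none := by
  induction nbs with
  | nil => rfl
  | cons nb rest ih =>
    have h0 : visited.contains nb = true := h nb (by simp)
    simp only [pvScanB, h0, if_pos]
    exact ih (fun x hx => h x (by simp [hx]))

-- pvScanB on a split list: everything before nb visited, nb not → first unvisited is nb
theorem pvScanB_append (visited : PySem.Set (Int × Int)) :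
    ∀ (pre : List (Int × Int)) (nb : Int × Int) (rest : List (Int × Int)),
      (∀ x ∈ pre, visited.contains x = true) → visited.contains nb = false →
      pvScanB (pre ++ nb :: rest) visited = some nb := by
  intro pre
  induction pre with
  | nil =>
    intro nb rest _ hnb
    simp only [List.nil_append, pvScanB]
    rw [if_neg (by simpa using hnb)]
  | cons x xs ih =>
    intro nb rest hpre hnb
    have hx : visited.contains x = true := hpre x (by simp)
    simp only [List.cons_append, pvScanB, hx, if_pos]
    exact ih nb rest (fun y hy => hpre y (by simp [hy])) hnb

-- a successful pvScanA: pvScanB agrees on the element found, and every index below the new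
-- frame index is visited-or-the-new-element
theorem pvScanA_some (nbs : List (Int × Int)) (visited : PySem.Set (Int × Int)) :
    ∀ k i nb i', nbs.length - i ≤ k → pvScanA nbs visited i = some (nb, i') →
      (∀ j (hj : j < nbs.length), j < i → visited.contains nbs[j] = true) →
      pvScanB nbs visited = some nb ∧
      ∀ j (hj : j < nbs.length), j < i' → (visited.contains nbs[j] = true ∨ nbs[j] = nb) := by
  intro k
  induction k with
  | zero =>
    intro i nb i' hk hsome hv
    unfold pvScanA at hsome
    rw [dif_neg (by omega)] at hsome
    exact absurd hsome (by simp)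
  | succ k ih =>
    intro i nb i' hk hsome hv
    unfold pvScanA at hsome
    by_cases h : i < nbs.length
    · rw [dif_pos h] at hsome
      by_cases hc : visited.contains nbs[i] = true
      · rw [if_pos hc] at hsome
        refine ih (i + 1) nb i' (by omega) hsome ?_
        intro j hj hji
        by_cases hji' : j = i
        · subst hji'; exact hc
        · exact hv j hj (by omega)
      · rw [if_neg hc] at hsome
        obtain ⟨rfl, rfl⟩ : nbs[i] = nb ∧ i + 1 = i' := by
          constructor <;> [exact congrArg (·.1) (Option.some_inj.mp hsome);
            exact congrArg (·.2) (Option.some_inj.mp hsome)]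
        refine ⟨pvScanB_first visited nbs i h hv (by simpa using hc), ?_⟩
        intro j hj hji
        by_cases hji' : j = i
        · subst hji'; right; rfl
        · left; exact hv j hj (by omega)
    · rw [dif_neg h] at hsome
      exact absurd hsome (by simp)

-- one step of 'visited' growth preserves containment
theorem pvContains_add (visited : PySem.Set (Int × Int)) (x y : Int × Int)
    (h : visited.contains x = true) : (visited.add y).contains x = true := by
  simp [PySem.Set.add]
  split <;> simp_all

-- the new element itself is in the grown set
theorem pvContains_add_self (visited : PySem.Set (Int × Int)) (x : Int × Int) :
    (visited.add x).contains x = true := by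
  simp [PySem.Set.add]
  split <;> simp_all

-- a cell has at most 4 open neighbors
theorem pvOpenNeighbors_length_le (cells : List (List Int)) (pos : Int × Int) :
    (pvOpenNeighbors cells pos).length ≤ 4 := by
  unfold pvOpenNeighbors
  dsimp only
  split_ifs <;> simp

-- A-side simulation: with a correct cache and every frame's saved index covering only
-- visited neighbors, A's indexed loop and the path-stack machine coincide step for step
theorem pvLoop_sim (cells : List (List Int)) (targets : List (Int × Int)) :
    ∀ fuel (stack : List ((Int × Int) × Nat)) visited trace cache,
      pvCacheOK cells cache →
      (∀ fr ∈ stack, ∀ j (hj : j < (pvOpenNeighbors cells fr.1).length), j < fr.2 →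
        visited.contains (pvOpenNeighbors cells fr.1)[j] = true) →
      pvLoopA cells targets fuel stack visited trace cache =
      pvLoopB cells targets fuel (stack.map Prod.fst) visited trace := by
  intro fuel
  induction fuel with
  | zero => intro stack visited trace cache _ _; rfl
  | succ fuel ih =>
    intro stack visited trace cache hcache hinv
    cases stack with
    | nil => rfl
    | cons fr rest =>
      obtain ⟨cur, i⟩ := fr
      have hfst := pvNeighborsCached_fst cells cache cur hcache
      have hsnd := pvNeighborsCached_snd cells cache cur hcache
      have hv : ∀ j (hj : j < (pvOpenNeighbors cells cur).length), j < i →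
          visited.contains (pvOpenNeighbors cells cur)[j] = true :=
        fun j hj hji => hinv (cur, i) (by simp) j hj hji
      simp only [pvLoopA, pvLoopB, List.map_cons, hfst]
      cases hscan : pvScanA (pvOpenNeighbors cells cur) visited i with
      | some p =>
        obtain ⟨nb, i'⟩ := p
        obtain ⟨hB, hpre⟩ := pvScanA_some (pvOpenNeighbors cells cur) visited
          ((pvOpenNeighbors cells cur).length) i nb i' (by omega) hscan hv
        rw [hB]
        have hinv' : ∀ fr ∈ (nb, 0) :: (cur, i') :: rest,
            ∀ j (hj : j < (pvOpenNeighbors cells fr.1).length), j < fr.2 →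
              (visited.add nb).contains (pvOpenNeighbors cells fr.1)[j] = true := by
          intro fr hfr j hj hji
          simp only [List.mem_cons] at hfr
          rcases hfr with rfl | rfl | hfr
          · omega
          · rcases hpre j hj hji with hvis | heq
            · exact pvContains_add visited _ nb hvis
            · rw [heq]; exact pvContains_add_self visited nb
          · exact pvContains_add visited _ nb (hinv fr (by simp [hfr]) j hj hji)
        have H := ih ((nb, 0) :: (cur, i') :: rest) (visited.add nb) (trace ++ [nb]) _
          hsnd hinv'
        by_cases ht : nb ∈ targets
        · simp [ht]
        · simp only [List.map_cons] at H
          simp [ht, H]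
      | none =>
        have hall := pvScanA_none (pvOpenNeighbors cells cur) visited
          ((pvOpenNeighbors cells cur).length) i (by omega) hscan hv
        rw [pvScanB_none _ _ hall]
        cases rest with
        | nil => rfl
        | cons fr' rest' =>
          obtain ⟨p, j⟩ := fr'
          have := ih ((p, j) :: rest') visited (trace ++ [p]) _
            hsnd (fun fr hfr k hk hkj => hinv fr (by simp [hfr]) k hk hkj)
          simpa using this

-- B-side simulation: the recursive dfs, resumed on the suffix 'rest' of cur's neighbor list
-- (everything before it visited), matches the path-stack machine at the SAME event fuel g,
-- for any recursion-depth guard F large enough.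
theorem pvGoB_sim (cells : List (List Int)) (targets : List (Int × Int)) :
    ∀ F g cur pre rest visited trace,
      pvOpenNeighbors cells cur = pre ++ rest →
      (∀ x ∈ pre, visited.contains x = true) →
      5 * g + rest.length + 1 ≤ F →
      ∀ path,
      (match pvGoB cells targets F cur rest g visited trace with
       | .found t' => pvLoopB cells targets g (cur :: path) visited trace = some t'
       | .timeout => pvLoopB cells targets g (cur :: path) visited trace = none
       | .fls v' t' h =>
           pvLoopB cells targets g (cur :: path) visited trace =
             pvLoopB cells targets h (cur :: path) v' t' ∧
           (∀ nb ∈ pvOpenNeighbors cells cur, v'.contains nb = true) ∧ h ≤ g ∧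
           (∀ x, visited.contains x = true → v'.contains x = true)) := by
  intro F
  induction F with
  | zero => intro g cur pre rest visited trace _ _ hF; omega
  | succ F ih =>
    intro g cur pre rest visited trace hsplit hpre hF path
    cases rest with
    | nil =>
      refine ⟨rfl, ?_, le_refl g, fun x hx => hx⟩
      intro nb hnb
      rw [hsplit, List.append_nil] at hnb
      exact hpre nb hnb
    | cons nb rest =>
      simp only [pvGoB]
      by_cases hc : visited.contains nb = true
      · rw [if_pos hc]
        have := ih g cur (pre ++ [nb]) rest visited trace
          (by rw [hsplit, List.append_assoc]; rfl)
          (by intro x hx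
              rcases List.mem_append.mp hx with hx | hx
              · exact hpre x hx
              · simp only [List.mem_singleton] at hx; subst hx; exact hc)
          (by simp at hF ⊢; omega) path
        exact this
      · rw [if_neg hc]
        have hscan : pvScanB (pvOpenNeighbors cells cur) visited = some nb := by
          rw [hsplit]
          exact pvScanB_append visited pre nb rest hpre (by simpa using hc)
        cases g with
        | zero => rfl
        | succ g' =>
          have hlen : (pvOpenNeighbors cells nb).length ≤ 4 :=
            pvOpenNeighbors_length_le cells nb
          by_cases ht : targets.contains nb = true
          · simp only [ht, if_pos]
            simp only [pvLoopB, hscan, ht, if_pos]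
          · simp only [ht, if_neg, Bool.false_eq_true, not_false_iff]
            have hstep : pvLoopB cells targets (g' + 1) (cur :: path) visited trace =
                pvLoopB cells targets g' (nb :: cur :: path) (visited.add nb) (trace ++ [nb]) := by
              simp only [pvLoopB, hscan, ht]
              simp
            have hinner := ih g' nb [] (pvOpenNeighbors cells nb)
              (visited.add nb) (trace ++ [nb]) rfl (by simp)
              (by simp at hF ⊢; omega) (cur :: path)
            cases hrec : pvGoB cells targets F nb (pvOpenNeighbors cells nb) g'
                (visited.add nb) (trace ++ [nb]) with
            | found t'' =>
              rw [hrec] at hinner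
              dsimp only
              rw [hstep]; exact hinner
            | timeout =>
              rw [hrec] at hinner
              dsimp only
              rw [hstep]; exact hinner
            | fls v'' t'' h =>
              rw [hrec] at hinner
              obtain ⟨heq, hallnb, hle, hmono⟩ := hinner
              cases h with
              | zero =>
                dsimp only
                rw [hstep, heq]; rfl
              | succ h' =>
                dsimp only
                have hpop : pvLoopB cells targets (h' + 1) (nb :: cur :: path) v'' t'' =
                    pvLoopB cells targets h' (cur :: path) v'' (t'' ++ [cur]) := by
                  simp only [pvLoopB, pvScanB_none _ _ hallnb]
                have hresume := ih h' cur (pre ++ [nb]) rest v'' (t'' ++ [cur])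
                  (by rw [hsplit, List.append_assoc]; rfl)
                  (by intro x hx
                      rcases List.mem_append.mp hx with hx | hx
                      · exact hmono x (pvContains_add visited x nb (hpre x hx))
                      · simp only [List.mem_singleton] at hx; subst hx
                        exact hmono x (pvContains_add_self visited x))
                  (by simp at hF ⊢; omega) path
                cases hres : pvGoB cells targets F cur rest h' v'' (t'' ++ [cur]) with
                | found t₃ =>
                  rw [hres] at hresume
                  dsimp only
                  rw [hstep, heq, hpop]; exact hresume
                | timeout =>
                  rw [hres] at hresume
                  dsimp only
                  rw [hstep, heq, hpop]; exact hresume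
                | fls v₃ t₃ h₃ =>
                  rw [hres] at hresume
                  dsimp only
                  obtain ⟨heq₃, hall₃, hle₃, hmono₃⟩ := hresume
                  refine ⟨?_, hall₃, by omega, ?_⟩
                  · rw [hstep, heq, hpop]; exact heq₃
                  · intro x hx
                    exact hmono₃ x (hmono x (pvContains_add visited x nb hx))

-- ===== VERDICT (by name: the statement is the Claim_ definition above) =====
theorem dfs_trace_to_nearest_py_spec : Claim_equal_dfs_trace_to_nearest_py := by
  intro cells src targets _ _
  unfold Spec_dfs_trace_to_nearest_py dfs_trace_to_nearest_py dfs_trace_to_nearest_py_alt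
  by_cases h : src ∈ targets
  · simp [h]
  · simp only [List.contains_iff_mem] at *
    rw [if_neg h, if_neg h]
    have hA := pvLoop_sim cells targets (pvFuel cells) [(src, 0)]
      (PySem.Set.ofList [src]) [src] (PySem.Dict.mk [])
      (by intro p l hl; simp [PySem.Dict.get?] at hl)
      (by intro fr hfr j hj hji; simp at hfr; simp [hfr] at hji)
    simp only [List.map_cons, List.map_nil] at hA
    rw [hA]
    have hB := pvGoB_sim cells targets (5 * pvFuel cells + 6) (pvFuel cells) src []
      (pvOpenNeighbors cells src) (PySem.Set.ofList [src]) [src] rfl (by simp)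
      (by have := pvOpenNeighbors_length_le cells src; omega) []
    cases hrec : pvGoB cells targets (5 * pvFuel cells + 6) src (pvOpenNeighbors cells src)
        (pvFuel cells) (PySem.Set.ofList [src]) [src] with
    | found t' =>
      rw [hrec] at hB
      rw [hB]
    | timeout =>
      rw [hrec] at hB
      rw [hB]
    | fls v' t' hfuel =>
      rw [hrec] at hB
      obtain ⟨heq, hall, _, _⟩ := hB
      rw [heq]
      cases hfuel with
      | zero => rfl
      | succ hf =>
        simp only [pvLoopB, pvScanB_none _ _ hall]
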